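-- pv_equiv track=rewrite | github.com/nikhilro/daily-coding-problem | p21.py | min_required_rooms_second_naive
-- ===== SOURCE A (Python) =====
-- def min_required_rooms_second_naive(intervals):  # not tested
--     def overlap(a, b):
--         return not (a[1] < b[0] or b[1] < a[0])
--
--     current_overlap, max_overlap = 0, 0
--     for overlap_interval in intervals:
--         for interval in intervals:
--             if overlap(overlap_interval, interval):
--                 current_overlap += 1
--
--         if current_overlap > max_overlap:
--             max_overlap = current_overlap
--         current_overlap = 0
--
--     return max_overlap
-- ===== SOURCE B (Python) =====
-- def min_required_rooms_second_naive(intervals):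
--     # Single backward pass keeping (interval, count) pairs for the processed
--     # suffix: each unordered pair is tested once and credited to both sides.
--     done = []  # (interval, overlap count within the processed suffix)
--     for a in reversed(intervals):
--         c = 1 if a[0] <= a[1] else 0  # an interval overlaps itself iff proper
--         new_done = []
--         for b, cb in done:
--             if b[0] <= a[1] and a[0] <= b[1]:
--                 c += 1
--                 cb += 1
--             new_done.append((b, cb))
--         done = [(a, c)] + new_done
--     best = 0
--     for _, c in done:
--         if c > best:
--             best = c
--     return best
-- ===== Notes on version B (the rewrite author's own statement) =====
-- stated objective: alternative
-- what changed: B replaces A's full n-by-n rescan per row with one backward pass that keeps (interval, count) pairs for the processed suffix, testing each unordered pair once and crediting both endpoints (self-overlap reduced to the check a[0] <= a[1]); the halved pair tests gave only a borderline ~1.4-1.5x in measurement, so no speed is claimed.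
import Mathlib
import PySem

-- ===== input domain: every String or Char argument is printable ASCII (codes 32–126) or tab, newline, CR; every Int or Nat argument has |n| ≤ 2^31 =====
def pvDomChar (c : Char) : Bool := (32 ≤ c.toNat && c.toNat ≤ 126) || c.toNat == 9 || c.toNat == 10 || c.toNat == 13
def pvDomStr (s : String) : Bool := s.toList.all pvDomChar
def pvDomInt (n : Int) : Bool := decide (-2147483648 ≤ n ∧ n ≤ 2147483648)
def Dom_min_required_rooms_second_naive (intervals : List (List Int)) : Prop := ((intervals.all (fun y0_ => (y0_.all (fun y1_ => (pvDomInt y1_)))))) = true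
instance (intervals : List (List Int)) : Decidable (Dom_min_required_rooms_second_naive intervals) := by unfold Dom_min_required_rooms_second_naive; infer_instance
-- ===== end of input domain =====

-- B makes one backward pass over the list, testing each unordered pair once and
-- crediting both endpoints, instead of A's full n×n rescan per row (objective: alternative).

-- total getter; exact for the in-range accesses Pre_ admits (lists of length ≥ 2)
def pvGet (l : List Int) (i : Int) : Int := (PySem.List.pyGet? l i).getD 0

-- ===== PORT A =====
def min_required_rooms_second_naive (intervals : List (List Int)) : Int :=
  let overlap : List Int → List Int → Bool := fun a b =>
    !(decide (pvGet a 1 < pvGet b 0) || decide (pvGet b 1 < pvGet a 0))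
  let st := intervals.foldl
    (fun (s : Int × Int) oi =>
      let cur := intervals.foldl (fun c iv => if overlap oi iv then c + 1 else c) s.1
      (0, if cur > s.2 then cur else s.2)) ((0 : Int), (0 : Int))
  st.2

-- ===== PORT B =====
def min_required_rooms_second_naive_alt (intervals : List (List Int)) : Int :=
  let done := intervals.reverse.foldl
    (fun (done : List (List Int × Int)) a =>
      let c0 : Int := if pvGet a 0 ≤ pvGet a 1 then 1 else 0
      let r := done.foldl
        (fun (s : Int × List (List Int × Int)) p =>
          if pvGet p.1 0 ≤ pvGet a 1 ∧ pvGet a 0 ≤ pvGet p.1 1 then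
            (s.1 + 1, s.2 ++ [(p.1, p.2 + 1)])
          else (s.1, s.2 ++ [(p.1, p.2)]))
        (c0, ([] : List (List Int × Int)))
      (a, r.1) :: r.2)
    ([] : List (List Int × Int))
  done.foldl (fun best p => if p.2 > best then p.2 else best) 0

-- ===== PRECONDITION & SPEC =====
-- A (and B) index l[0] and l[1] of every interval: with any interval shorter than 2,
-- Python A raises IndexError; Pre_ excludes exactly those inputs.
def Pre_min_required_rooms_second_naive (intervals : List (List Int)) : Prop :=
  ∀ l ∈ intervals, 2 ≤ l.length
instance (intervals : List (List Int)) : Decidable (Pre_min_required_rooms_second_naive intervals) := by unfold Pre_min_required_rooms_second_naive; infer_instance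
def pvWitness_min_required_rooms_second_naive : List (List Int) := [[0, 1], [1, 2]]

def Spec_min_required_rooms_second_naive (intervals : List (List Int)) (out : Int) : Prop := out = min_required_rooms_second_naive_alt intervals
instance (intervals : List (List Int)) (out : Int) : Decidable (Spec_min_required_rooms_second_naive intervals out) := by unfold Spec_min_required_rooms_second_naive; infer_instance

-- ===== CLAIM (what is proved, stated in full; the proofs are below) =====
def Claim_equal_min_required_rooms_second_naive : Prop := ∀ (intervals : List (List Int)), Dom_min_required_rooms_second_naive intervals → Pre_min_required_rooms_second_naive intervals → Spec_min_required_rooms_second_naive intervals (min_required_rooms_second_naive intervals)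

-- ===== LEMMAS AND PROOFS =====

-- symmetric overlap test (as a Bool), and the per-interval overlap count
def ovB (a b : List Int) : Bool := decide (pvGet b 0 ≤ pvGet a 1 ∧ pvGet a 0 ≤ pvGet b 1)

def cntOv (a : List Int) (s : List (List Int)) : Int := (s.countP (ovB a) : Int)

def doneOf (s : List (List Int)) : List (List Int × Int) := s.map (fun b => (b, cntOv b s))

-- A's fold step and the max-of-counts step, named for the induction
def Astep (intervals : List (List Int)) : Int × Int → List Int → Int × Int :=
  fun s oi =>
    let cur := intervals.foldl (fun c iv => if (!(decide (pvGet oi 1 < pvGet iv 0) || decide (pvGet iv 1 < pvGet oi 0))) then c + 1 else c) s.1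
    (0, if cur > s.2 then cur else s.2)

def maxStep (intervals : List (List Int)) : Int → List Int → Int :=
  fun m a => if cntOv a intervals > m then cntOv a intervals else m

theorem ovB_comm (a b : List Int) : ovB a b = ovB b a := by
  simp [ovB, and_comm]

theorem ovA_eq_ovB (a b : List Int) :
    (!(decide (pvGet a 1 < pvGet b 0) || decide (pvGet b 1 < pvGet a 0))) = ovB a b := by
  by_cases h1 : pvGet a 1 < pvGet b 0 <;> by_cases h2 : pvGet b 1 < pvGet a 0 <;>
    simp [ovB, h1, h2] <;> omega

theorem cntOv_cons (b a : List Int) (s : List (List Int)) :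
    cntOv b (a :: s) = cntOv b s + if ovB b a then 1 else 0 := by
  simp only [cntOv, List.countP_cons]
  by_cases h : ovB b a = true <;> simp [h]

theorem innerA' (a : List Int) (l : List (List Int)) : ∀ c0 : Int,
    l.foldl (fun c iv => if ovB a iv then c + 1 else c) c0 = c0 + cntOv a l := by
  induction l with
  | nil => intro c0; simp [cntOv]
  | cons b t ih =>
    intro c0
    rw [List.foldl_cons, ih, cntOv_cons]
    by_cases h : ovB a b = true
    · rw [if_pos h, if_pos h]; ring
    · rw [if_neg h, if_neg h]; ring

theorem innerA (a : List Int) (l : List (List Int)) (c0 : Int) :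
    l.foldl (fun c iv => if (!(decide (pvGet a 1 < pvGet iv 0) || decide (pvGet iv 1 < pvGet a 0))) then c + 1 else c) c0
      = c0 + cntOv a l := by
  have hf : (fun (c : Int) (iv : List Int) => if (!(decide (pvGet a 1 < pvGet iv 0) || decide (pvGet iv 1 < pvGet a 0))) then c + 1 else c)
      = fun c iv => if ovB a iv then c + 1 else c := by
    funext c iv; rw [ovA_eq_ovB]
  rw [hf, innerA']

theorem Astep_zero (intervals : List (List Int)) (r : List Int) (m : Int) :
    Astep intervals (0, m) r = (0, maxStep intervals m r) := by
  unfold Astep maxStep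
  rw [innerA]
  norm_num

theorem outerA (intervals : List (List Int)) : ∀ (rows : List (List Int)) (m : Int),
    (rows.foldl (Astep intervals) ((0 : Int), m)).2 = rows.foldl (maxStep intervals) m := by
  intro rows
  induction rows with
  | nil => intro m; simp
  | cons r t ih =>
    intro m
    rw [List.foldl_cons, Astep_zero, List.foldl_cons]
    exact ih _

theorem A_char (intervals : List (List Int)) :
    min_required_rooms_second_naive intervals
      = intervals.foldl (maxStep intervals) 0 := by
  exact outerA intervals intervals 0

theorem innerB (a : List Int) (d : List (List Int × Int)) : ∀ (c0 : Int) (acc : List (List Int × Int)),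
    d.foldl
      (fun (s : Int × List (List Int × Int)) p =>
        if pvGet p.1 0 ≤ pvGet a 1 ∧ pvGet a 0 ≤ pvGet p.1 1 then
          (s.1 + 1, s.2 ++ [(p.1, p.2 + 1)])
        else (s.1, s.2 ++ [(p.1, p.2)])) (c0, acc)
    = (c0 + (d.countP (fun p => ovB a p.1) : Int),
       acc ++ d.map (fun p => (p.1, p.2 + if ovB a p.1 then 1 else 0))) := by
  induction d with
  | nil => intro c0 acc; simp
  | cons p t ih =>
    intro c0 acc
    by_cases h : pvGet p.1 0 ≤ pvGet a 1 ∧ pvGet a 0 ≤ pvGet p.1 1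
    · have hb : ovB a p.1 = true := by simp [ovB, h]
      simp only [List.foldl_cons, if_pos h, ih, List.countP_cons, hb, List.map_cons,
        Prod.mk.injEq]
      refine ⟨by push_cast; ring, by simp⟩
    · have hb : ovB a p.1 = false := by simp only [ovB]; simpa using h
      simp only [List.foldl_cons, if_neg h, ih, List.countP_cons, hb, List.map_cons,
        Prod.mk.injEq]
      refine ⟨by push_cast; ring, by simp⟩

theorem step_done (a : List Int) (s : List (List Int)) :
    (let c0 : Int := if pvGet a 0 ≤ pvGet a 1 then 1 else 0
     let r := (doneOf s).foldl
        (fun (st : Int × List (List Int × Int)) p =>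
          if pvGet p.1 0 ≤ pvGet a 1 ∧ pvGet a 0 ≤ pvGet p.1 1 then
            (st.1 + 1, st.2 ++ [(p.1, p.2 + 1)])
          else (st.1, st.2 ++ [(p.1, p.2)]))
        (c0, ([] : List (List Int × Int)))
     (a, r.1) :: r.2)
    = doneOf (a :: s) := by
  simp only [innerB, doneOf, List.map_map, List.nil_append, List.map_cons, List.cons.injEq,
    Prod.mk.injEq, true_and]
  refine ⟨?_, ?_⟩
  · -- head: count for a over a :: s
    rw [List.countP_map]
    have hcomp : ((fun p : List Int × Int => ovB a p.1) ∘ fun b => (b, cntOv b s)) = ovB a := rfl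
    rw [hcomp, cntOv_cons, ovB_comm]
    by_cases h : pvGet a 0 ≤ pvGet a 1 <;> simp [ovB, h, cntOv] <;> ring
  · -- tail: each count gains the overlap with a
    apply List.map_congr_left
    intro b _
    simp [cntOv_cons, ovB_comm a b]

theorem done_all (s : List (List Int)) :
    s.reverse.foldl
      (fun (done : List (List Int × Int)) a =>
        let c0 : Int := if pvGet a 0 ≤ pvGet a 1 then 1 else 0
        let r := done.foldl
          (fun (st : Int × List (List Int × Int)) p =>
            if pvGet p.1 0 ≤ pvGet a 1 ∧ pvGet a 0 ≤ pvGet p.1 1 then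
              (st.1 + 1, st.2 ++ [(p.1, p.2 + 1)])
            else (st.1, st.2 ++ [(p.1, p.2)]))
          (c0, ([] : List (List Int × Int)))
        (a, r.1) :: r.2)
      ([] : List (List Int × Int))
    = doneOf s := by
  induction s with
  | nil => simp [doneOf]
  | cons a t ih =>
    rw [List.reverse_cons, List.foldl_append, ih, ← step_done a t]
    simp [List.foldl_cons]

theorem B_char (intervals : List (List Int)) :
    min_required_rooms_second_naive_alt intervals
      = intervals.foldl (maxStep intervals) 0 := by
  unfold min_required_rooms_second_naive_alt
  rw [done_all]
  simp only [doneOf, List.foldl_map]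
  rfl

-- ===== VERDICT (by name: the statement is the Claim_ definition above) =====
theorem min_required_rooms_second_naive_spec : Claim_equal_min_required_rooms_second_naive := by
  intro intervals _ _
  unfold Spec_min_required_rooms_second_naive
  rw [A_char, B_char]
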